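-- pv_equiv track=rewrite | github.com/aarboleda1/Elements-Of-Programming-Interviews | epi_judge_python_solutions/smallest_subarray_covering_set.py | find_smallest_subarray_covering_set
-- ===== SOURCE A (Python) =====
-- import collections
--
-- Subarray = collections.namedtuple('Subarray', ('start', 'end'))
--
-- def find_smallest_subarray_covering_set(paragraph, keywords):
--
--     keywords_to_cover = collections.Counter(keywords)
--     result = Subarray(-1, -1)
--     remaining_to_cover = len(keywords)
--     left = 0
--     for right, p in enumerate(paragraph):
--         if p in keywords:
--             keywords_to_cover[p] -= 1
--             if keywords_to_cover[p] >= 0: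
--                 remaining_to_cover -= 1
--
--         # Keeps advancing left until keywords_to_cover does not contain all
--         # keywords.
--         while remaining_to_cover == 0:
--             if result == (-1, -1) or right - left < result[1] - result[0]:
--                 result = (left, right)
--             pl = paragraph[left]
--             if pl in keywords:
--                 keywords_to_cover[pl] += 1
--                 if keywords_to_cover[pl] > 0:
--                     remaining_to_cover += 1
--             left += 1
--     return result
-- ===== SOURCE B (Python) =====
-- import collections
--
--
-- def find_smallest_subarray_covering_set(paragraph, keywords):
--     # Single forward pass: for every keyword keep a bounded deque of its most
--     # recent required positions; when all required positions are present, the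
--     # best window ending here starts at the minimum stored position.
--     need = collections.Counter(keywords)
--     last_pos = {k: collections.deque() for k in need}
--     stored = 0
--     total = len(keywords)
--     result = (-1, -1)
--     for i, p in enumerate(paragraph):
--         if p in need:
--             dq = last_pos[p]
--             if len(dq) == need[p]:
--                 dq.popleft()
--             else:
--                 stored += 1
--             dq.append(i)
--             if stored == total:
--                 left = min(d[0] for d in last_pos.values())
--                 if result == (-1, -1) or i - left < result[1] - result[0]:
--                     result = (left, i)
--     return result
-- ===== Notes on version B (the rewrite author's own statement) =====
-- stated objective: alternative
-- what changed: Replaces A's two-pointer window-shrinking loop by a single forward pass that keeps, for each keyword, a bounded deque of its most recent required positions; when every required position is stored, the best window ending at the current index starts at the minimum stored position (A's strict '<' tie-break is preserved).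
import Mathlib
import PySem

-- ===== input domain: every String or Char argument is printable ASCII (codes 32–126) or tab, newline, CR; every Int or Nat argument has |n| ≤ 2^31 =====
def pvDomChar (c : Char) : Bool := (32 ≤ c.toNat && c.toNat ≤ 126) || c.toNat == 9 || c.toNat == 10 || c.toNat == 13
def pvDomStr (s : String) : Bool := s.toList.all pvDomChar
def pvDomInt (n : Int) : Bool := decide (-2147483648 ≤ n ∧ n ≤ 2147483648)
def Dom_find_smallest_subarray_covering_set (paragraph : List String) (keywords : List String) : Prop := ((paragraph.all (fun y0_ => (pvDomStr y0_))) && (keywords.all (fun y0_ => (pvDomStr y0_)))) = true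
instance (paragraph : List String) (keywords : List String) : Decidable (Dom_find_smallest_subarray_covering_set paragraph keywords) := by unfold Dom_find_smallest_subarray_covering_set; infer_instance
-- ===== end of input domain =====

-- Port A = two-pointer shrinking window; port B = forward pass with per-keyword deques of recent
-- positions (alternative algorithm, similar cost). Equivalence proved on Pre_; A raises IndexError
-- when keywords = [] and paragraph ≠ [] (B returns (-1, -1) there).


-- ===== PORT A =====
-- the `while remaining_to_cover == 0` loop; fuel is a totality guard only (the loop advances
-- `left` each round; when `paragraph[left]` would raise IndexError we stop — outside Pre_).
def pvShrinkA (paragraph : List String) (keywords : List String) (right : Int) :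
    Nat → PySem.Dict String Int × Int × Int × (Int × Int) → PySem.Dict String Int × Int × Int × (Int × Int)
  | 0, st => st
  | fuel + 1, (cnt, rem, left, res) =>
    if rem = 0 then
      let res := if res = ((-1 : Int), (-1 : Int)) ∨ right - left < res.2 - res.1 then (left, right) else res
      match PySem.List.pyGet? paragraph left with
      | none => (cnt, rem, left, res)   -- Python raises IndexError here (excluded by Pre_)
      | some pl =>
        if keywords.contains pl then
          let c := cnt.getD pl 0 + 1
          pvShrinkA paragraph keywords right fuel
            (cnt.insert pl c, (if 0 < c then rem + 1 else rem), left + 1, res)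
        else
          pvShrinkA paragraph keywords right fuel (cnt, rem, left + 1, res)
    else (cnt, rem, left, res)

-- the body of A's `for right, p in enumerate(paragraph)` loop
def pvStepA (paragraph : List String) (keywords : List String)
    (st : PySem.Dict String Int × Int × Int × (Int × Int)) (ri : Int × String) :
    PySem.Dict String Int × Int × Int × (Int × Int) :=
  let cnt := st.1; let rem := st.2.1; let left := st.2.2.1; let res := st.2.2.2
  let right := ri.1; let p := ri.2
  let cr :=
    if keywords.contains p then
      let c := cnt.getD p 0 - 1
      (cnt.insert p c, if 0 ≤ c then rem - 1 else rem)
    else (cnt, rem)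
  pvShrinkA paragraph keywords right (paragraph.length + 1) (cr.1, cr.2, left, res)

def find_smallest_subarray_covering_set (paragraph : List String) (keywords : List String) : Int × Int :=
  let st0 : PySem.Dict String Int × Int × Int × (Int × Int) :=
    (PySem.Dict.counter keywords, PySem.List.len keywords, 0, (-1, -1))
  ((PySem.List.enumerate paragraph).foldl (pvStepA paragraph keywords) st0).2.2.2

-- ===== PORT B =====
-- the body of B's `for i, p in enumerate(paragraph)` loop (need = Counter(keywords), total = len(keywords))
def pvStepB (need : PySem.Dict String Int) (total : Int)
    (st : PySem.Dict String (List Int) × Int × (Int × Int)) (ip : Int × String) :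
    PySem.Dict String (List Int) × Int × (Int × Int) :=
  let lp := st.1; let stored := st.2.1; let res := st.2.2
  let i := ip.1; let p := ip.2
  if need.contains p then
    let dq := lp.getD p []
    let ds := if (dq.length : Int) = need.getD p 0 then (dq.drop 1, stored) else (dq, stored + 1)
    let dq := ds.1 ++ [i]
    let lp := lp.insert p dq
    if ds.2 = total then
      -- min(d[0] for d in last_pos.values()); every deque is nonempty here, so the
      -- defaults of headD/getD are never used
      let left := ((PySem.List.min? (lp.values.map (fun d => d.headD 0)) (fun x => x)).getD 0)
      let res := if res = ((-1 : Int), (-1 : Int)) ∨ i - left < res.2 - res.1 then (left, i) else res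
      (lp, ds.2, res)
    else (lp, ds.2, res)
  else st

def find_smallest_subarray_covering_set_alt (paragraph : List String) (keywords : List String) : Int × Int :=
  let need := PySem.Dict.counter keywords
  let lp0 : PySem.Dict String (List Int) :=
    need.keys.foldl (fun d k => d.insert k ([] : List Int)) PySem.Dict.empty
  ((PySem.List.enumerate paragraph).foldl (pvStepB need (PySem.List.len keywords))
      (lp0, (0 : Int), ((-1 : Int), (-1 : Int)))).2.2

-- ===== PRECONDITION & SPEC =====
-- Pre_ excludes exactly the inputs on which A raises IndexError: empty keywords with a
-- non-empty paragraph (the shrink loop then walks left off the end of the paragraph).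
def Pre_find_smallest_subarray_covering_set (paragraph : List String) (keywords : List String) : Prop :=
  keywords ≠ [] ∨ paragraph = []
instance (paragraph : List String) (keywords : List String) : Decidable (Pre_find_smallest_subarray_covering_set paragraph keywords) := by unfold Pre_find_smallest_subarray_covering_set; infer_instance
def pvWitness_find_smallest_subarray_covering_set : List String × List String :=
  (["a", "b", "a", "c", "b"], ["b", "a", "b"])

def Spec_find_smallest_subarray_covering_set (paragraph : List String) (keywords : List String) (out : Int × Int) : Prop := out = find_smallest_subarray_covering_set_alt paragraph keywords
instance (paragraph : List String) (keywords : List String) (out : Int × Int) : Decidable (Spec_find_smallest_subarray_covering_set paragraph keywords out) := by unfold Spec_find_smallest_subarray_covering_set; infer_instance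

-- ===== CLAIM (what is proved, stated in full; the proofs are below) =====
def Claim_equal_find_smallest_subarray_covering_set : Prop := ∀ (paragraph : List String) (keywords : List String), Dom_find_smallest_subarray_covering_set paragraph keywords → Pre_find_smallest_subarray_covering_set paragraph keywords → Spec_find_smallest_subarray_covering_set paragraph keywords (find_smallest_subarray_covering_set paragraph keywords)


-- ===== LEMMAS AND PROOFS =====

-- `w` covers the multiset of keywords
def pvCovers (kw w : List String) : Prop := ∀ k ∈ kw, kw.count k ≤ w.count k

-- the value A's `remaining_to_cover` holds for window `w`
def pvRem (kw w : List String) : Int :=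
  ((PySem.List.dedup kw).map (fun k => max 0 ((kw.count k : Int) - (w.count k : Int)))).sum

-- the `result` update both programs perform (strict `<`, first minimal window kept)
def pvUpd (r : Int) (res : Int × Int) (l : Int) : Int × Int :=
  if res = ((-1 : Int), (-1 : Int)) ∨ r - l < res.2 - res.1 then (l, r) else res

-- B's deque invariant: dq holds the positions of the last min(need, occurrences) copies of k in pre
def pvDq (kw pre : List String) (k : String) (dq : List Int) : Prop :=
  dq.length = min (kw.count k) (pre.count k) ∧
  dq.Pairwise (· < ·) ∧
  (∀ e ∈ dq, 0 ≤ e ∧ e < (pre.length : Int)) ∧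
  ∀ l : Nat, min (kw.count k) ((pre.drop l).count k) = dq.countP (fun e => decide ((l : Int) ≤ e))

-- the joint invariant carried over the prefix `pre` already processed
def pvJ (kw pre : List String)
    (stA : PySem.Dict String Int × Int × Int × (Int × Int))
    (stB : PySem.Dict String (List Int) × Int × (Int × Int)) : Prop :=
  0 ≤ stA.2.2.1 ∧ stA.2.2.1.toNat ≤ pre.length ∧
  (∀ k ∈ kw, stA.1.getD k 0 = (kw.count k : Int) - ((pre.drop stA.2.2.1.toNat).count k : Int)) ∧
  stA.2.1 = pvRem kw (pre.drop stA.2.2.1.toNat) ∧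
  1 ≤ stA.2.1 ∧
  (stA.2.2.1 = 0 ∨ pvCovers kw (pre.drop (stA.2.2.1.toNat - 1))) ∧
  stB.2.2 = stA.2.2.2 ∧
  (pvCovers kw pre → stA.2.2.2 ≠ ((-1 : Int), (-1 : Int)) ∧
    stA.2.2.2.2 - stA.2.2.2.1 ≤ (pre.length : Int) - stA.2.2.1) ∧
  (∃ f : String → List Int,
    stB.1.items = (PySem.List.dedup kw).map (fun k => (k, f k)) ∧
    stB.2.1 = ((PySem.List.dedup kw).map (fun k => ((f k).length : Int))).sum ∧
    ∀ k ∈ PySem.List.dedup kw, pvDq kw pre k (f k))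

-- ---- generic list lemmas ----

lemma pvSum_congr_except {α : Type} [DecidableEq α] (xs : List α) (f g : α → Int) (p : α)
    (hnd : xs.Nodup) (h : ∀ x ∈ xs, x ≠ p → f x = g x) :
    (xs.map f).sum = (xs.map g).sum + (if p ∈ xs then f p - g p else 0) := by
  induction xs with
  | nil => simp
  | cons x t ih =>
    rcases List.nodup_cons.mp hnd with ⟨hx, hnd'⟩
    by_cases hxp : x = p
    · subst hxp
      have ht : t.map f = t.map g := by
        apply List.map_congr_left
        intro y hy
        exact h y (List.mem_cons_of_mem _ hy) (fun hyp => hx (hyp ▸ hy))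
      simp only [List.map_cons, List.sum_cons, ht, List.mem_cons, true_or, if_pos]
      ring
    · have hrec := ih hnd' (fun y hy hyp => h y (List.mem_cons_of_mem _ hy) hyp)
      have hfx : f x = g x := h x (List.mem_cons_self ..) hxp
      by_cases hp : p ∈ t
      · simp only [List.map_cons, List.sum_cons, hrec, hfx, if_pos hp,
          if_pos (List.mem_cons.mpr (Or.inr hp))]
        ring
      · have hnp : p ∉ x :: t := by
          intro hc; rcases List.mem_cons.mp hc with hc | hc
          · exact hxp hc.symm
          · exact hp hc
        simp only [List.map_cons, List.sum_cons, hrec, hfx, if_neg hp, if_neg hnp]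
        ring

lemma pvSum_le_mono {α : Type} (xs : List α) (f g : α → Int) (hle : ∀ x ∈ xs, f x ≤ g x) :
    (xs.map f).sum ≤ (xs.map g).sum := by
  induction xs with
  | nil => simp
  | cons x t ih =>
    have h1 := hle x (List.mem_cons_self ..)
    have h2 := ih (fun y hy => hle y (List.mem_cons_of_mem _ hy))
    simp only [List.map_cons, List.sum_cons]
    omega

lemma pvSum_eq_iff {α : Type} (xs : List α) (f g : α → Int) (hle : ∀ x ∈ xs, f x ≤ g x) :
    (xs.map f).sum = (xs.map g).sum ↔ ∀ x ∈ xs, f x = g x := by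
  induction xs with
  | nil => simp
  | cons x t ih =>
    have h1 := hle x (List.mem_cons_self ..)
    have h2 := pvSum_le_mono t f g (fun y hy => hle y (List.mem_cons_of_mem _ hy))
    have h3 := ih (fun y hy => hle y (List.mem_cons_of_mem _ hy))
    simp only [List.map_cons, List.sum_cons, List.mem_cons]
    constructor
    · intro hs
      have hfx : f x = g x := by omega
      have hsum : (t.map f).sum = (t.map g).sum := by omega
      rcases h3.mp hsum with h4
      intro y hy
      rcases hy with rfl | hy
      · exact hfx
      · exact h4 y hy
    · intro hy
      have : (t.map f).sum = (t.map g).sum := h3.mpr (fun y hy' => hy y (Or.inr hy'))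
      have := hy x (Or.inl rfl)
      omega

lemma pvSum_need (kw : List String) :
    ((PySem.List.dedup kw).map (fun k => (kw.count k : Int))).sum = (kw.length : Int) := by
  have hcast : ∀ (l : List String), (l.map (fun k => (kw.count k : Int))).sum = (((l.map (fun k => kw.count k)).sum : Nat) : Int) := by
    intro l; induction l with
    | nil => simp
    | cons x t ih => simp [ih]
  have hperm : (PySem.List.dedup kw).Perm kw.dedup := by
    rw [List.perm_ext_iff_of_nodup (PySem.List.nodup_dedup kw) (List.nodup_dedup (l := kw))]
    intro a; rw [PySem.List.mem_dedup, List.mem_dedup]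
  have hs := (hperm.map (fun k => (kw.count k : Int))).sum_eq
  rw [hs, hcast, List.sum_map_count_dedup_eq_length kw]

-- ---- pvCovers / pvRem ----

lemma pvCovers_of_sublist (kw w w' : List String) (hs : w.Sublist w') (h : pvCovers kw w) :
    pvCovers kw w' := by
  intro k hk
  exact le_trans (h k hk) (hs.count_le k)

lemma pvCovers_drop_mono (kw pre : List String) (l l' : Nat) (hll : l ≤ l')
    (h : pvCovers kw (pre.drop l')) : pvCovers kw (pre.drop l) := by
  have hs : (pre.drop l').Sublist (pre.drop l) := by
    have : pre.drop l' = (pre.drop l).drop (l' - l) := by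
      rw [List.drop_drop]; congr 1; omega
    rw [this]; exact List.drop_sublist _ _
  exact pvCovers_of_sublist kw _ _ hs h

lemma pvRem_nonneg (kw w : List String) : 0 ≤ pvRem kw w := by
  apply List.sum_nonneg
  intro x hx
  rcases List.mem_map.mp hx with ⟨k, _, rfl⟩
  exact le_max_left _ _

lemma pvRem_eq_zero_iff (kw w : List String) : pvRem kw w = 0 ↔ pvCovers kw w := by
  unfold pvRem
  have hz : ∀ (l : List Int), (∀ x ∈ l, 0 ≤ x) → l.sum = 0 → ∀ x ∈ l, x = 0 := by
    intro l
    induction l with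
    | nil => intro _ _ x hx; simp at hx
    | cons a t ih =>
      intro hl hs x hx
      have ha := hl a (List.mem_cons_self ..)
      have hts : 0 ≤ t.sum := List.sum_nonneg (fun y hy => hl y (List.mem_cons_of_mem _ hy))
      simp only [List.sum_cons] at hs
      rcases List.mem_cons.mp hx with rfl | hx'
      · omega
      · exact ih (fun y hy => hl y (List.mem_cons_of_mem _ hy)) (by omega) x hx'
  constructor
  · intro h k hk
    have hkd : k ∈ PySem.List.dedup kw := (PySem.List.mem_dedup _ _).mpr hk
    have := hz _ (by intro x hx; rcases List.mem_map.mp hx with ⟨j, _, rfl⟩; exact le_max_left _ _)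
      h _ (List.mem_map.mpr ⟨k, hkd, rfl⟩)
    omega
  · intro h
    apply List.sum_eq_zero
    intro x hx
    rcases List.mem_map.mp hx with ⟨k, hk, rfl⟩
    have := h k ((PySem.List.mem_dedup _ _).mp hk)
    omega

lemma pvCovers_nonempty (kw w : List String) (hkw : kw ≠ []) (h : pvCovers kw w) : w ≠ [] := by
  rcases kw with _ | ⟨k, t⟩
  · exact absurd rfl hkw
  · have h1 : 0 < (k :: t).count k := List.count_pos_iff.mpr (List.mem_cons_self ..)
    have h2 := h k (List.mem_cons_self ..)
    intro hw
    subst hw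
    simp only [List.count_nil] at h2
    omega

-- ---- pvUpd ----

lemma pvUpd_chain (r l l' : Int) (res : Int × Int) (hl : 0 ≤ l) (hll : l ≤ l') :
    pvUpd r (pvUpd r res l) l' = pvUpd r res l' := by
  obtain ⟨a, b⟩ := res
  have hpair : ∀ u v : Int, ((u, v) : Int × Int) = (-1, -1) ↔ u = -1 ∧ v = -1 := by
    intro u v; rw [Prod.ext_iff]
  by_cases hc1 : ((a, b) : Int × Int) = (-1, -1) ∨ r - l < b - a
  · have hinner : pvUpd r (a, b) l = (l, r) := by unfold pvUpd; exact if_pos hc1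
    rw [hinner]
    by_cases hll' : l = l'
    · subst hll'
      have h2 : pvUpd r ((l, r) : Int × Int) l = (l, r) := by
        unfold pvUpd
        rw [if_neg]
        intro hc
        rcases hc with hc | hc
        · rw [hpair] at hc; omega
        · exact absurd hc (by show ¬ (r - l < r - l); omega)
      rw [h2]
      unfold pvUpd
      rw [if_pos hc1]
    · have hlt : l < l' := by omega
      have h2 : pvUpd r ((l, r) : Int × Int) l' = (l', r) := by
        unfold pvUpd; exact if_pos (Or.inr (show r - l' < r - l by omega))
      rw [h2]
      unfold pvUpd
      rw [if_pos]
      rcases hc1 with hc1 | hc1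
      · exact Or.inl hc1
      · exact Or.inr (show r - l' < b - a by omega)
  · have hinner : pvUpd r (a, b) l = (a, b) := by unfold pvUpd; exact if_neg hc1
    rw [hinner]

lemma pvUpd_ne (r l : Int) (res : Int × Int) (hl : 0 ≤ l) :
    pvUpd r res l ≠ ((-1 : Int), (-1 : Int)) := by
  unfold pvUpd
  split_ifs with h
  · intro hc; rw [Prod.ext_iff] at hc; simp at hc; omega
  · intro hc; exact h (Or.inl hc)

lemma pvUpd_noupdate (r l : Int) (res : Int × Int) (hres : res ≠ ((-1 : Int), (-1 : Int)))
    (h : res.2 - res.1 ≤ r - l) : pvUpd r res l = res := by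
  unfold pvUpd
  rw [if_neg]
  intro hc
  rcases hc with hc | hc
  · exact hres hc
  · omega

lemma pvUpd_len_le (r l : Int) (res : Int × Int) :
    (pvUpd r res l).2 - (pvUpd r res l).1 ≤ r - l := by
  unfold pvUpd
  split_ifs with h
  · exact le_refl _
  · rcases not_or.mp h with ⟨h1, h2⟩
    omega

-- ---- pvDq ----

lemma pvDq_nil (kw : List String) (k : String) : pvDq kw [] k [] := by
  refine ⟨by simp, by simp, by simp, ?_⟩
  intro l
  simp

lemma pvDq_append_ne (kw pre : List String) (k p : String) (dq : List Int) (hne : k ≠ p)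
    (h : pvDq kw pre k dq) : pvDq kw (pre ++ [p]) k dq := by
  obtain ⟨hlen, hsort, hbnd, hchar⟩ := h
  have hcnt : (pre ++ [p]).count k = pre.count k := by
    simp [List.count_append, Ne.symm hne]
  refine ⟨by rw [hcnt]; exact hlen, hsort, ?_, ?_⟩
  · intro e he
    have hb := hbnd e he
    refine ⟨hb.1, ?_⟩
    simp only [List.length_append, List.length_singleton]
    push_cast
    omega
  · intro l
    rw [List.drop_append, List.count_append]
    have hz : ((([p] : List String)).drop (l - pre.length)).count k = 0 := by
      cases hm : l - pre.length with
      | zero => simp [Ne.symm hne]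
      | succ n => simp
    rw [hz, Nat.add_zero]
    exact hchar l

lemma pvDq_append_self (kw pre : List String) (p : String) (dq : List Int) (hp : p ∈ kw)
    (h : pvDq kw pre p dq) :
    pvDq kw (pre ++ [p]) p
      ((if dq.length = kw.count p then dq.drop 1 else dq) ++ [(pre.length : Int)]) := by
  obtain ⟨hlen, hsort, hbnd, hchar⟩ := h
  have hneed1 : 1 ≤ kw.count p := List.count_pos_iff.mpr hp
  have hdrople : ∀ l : Nat, l ≤ pre.length → (pre ++ [p]).drop l = pre.drop l ++ [p] := by
    intro l hl
    rw [List.drop_append]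
    have h0 : l - pre.length = 0 := by omega
    rw [h0, List.drop_zero]
  have hdropgt : ∀ l : Nat, pre.length < l → (pre ++ [p]).drop l = [] := by
    intro l hl
    apply List.drop_eq_nil_of_le
    simp only [List.length_append, List.length_singleton]
    omega
  have hcountdrop : ∀ l : Nat, (pre.drop l).count p ≤ pre.count p :=
    fun l => (List.drop_sublist l pre).count_le p
  have hcntp : (pre ++ [p]).count p = pre.count p + 1 := by
    simp [List.count_append]
  by_cases hfull : dq.length = kw.count p
  · have hneedc : kw.count p ≤ pre.count p := by rw [hfull] at hlen; omega
    obtain ⟨e, rest, rfl⟩ : ∃ e rest, dq = e :: rest := by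
      cases dq with
      | nil => simp only [List.length_nil] at hfull; omega
      | cons a t => exact ⟨a, t, rfl⟩
    rw [if_pos hfull]
    simp only [List.drop_one, List.tail_cons]
    have hrest_lt : ∀ x ∈ rest, e < x := (List.pairwise_cons.mp hsort).1
    have hrest_sort : rest.Pairwise (· < ·) := (List.pairwise_cons.mp hsort).2
    simp only [List.length_cons] at hfull hlen
    refine ⟨?_, ?_, ?_, ?_⟩
    · rw [hcntp]
      simp only [List.length_append, List.length_singleton]
      omega
    · rw [List.pairwise_append]
      refine ⟨hrest_sort, List.pairwise_singleton _ _, ?_⟩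
      intro x hx y hy
      rw [List.mem_singleton] at hy
      subst hy
      exact (hbnd x (List.mem_cons_of_mem _ hx)).2
    · intro x hx
      rcases List.mem_append.mp hx with hx | hx
      · have hb := hbnd x (List.mem_cons_of_mem _ hx)
        refine ⟨hb.1, ?_⟩
        simp only [List.length_append, List.length_singleton]
        push_cast
        omega
      · rw [List.mem_singleton] at hx
        subst hx
        refine ⟨Int.natCast_nonneg _, ?_⟩
        simp only [List.length_append, List.length_singleton]
        push_cast
        omega
    · intro l
      by_cases hlN : l ≤ pre.length
      · rw [hdrople l hlN, List.count_append]
        have hone : (([p] : List String)).count p = 1 := by simp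
        rw [hone, List.countP_append]
        have hlNi : (l : Int) ≤ (pre.length : Int) := by exact_mod_cast hlN
        have hNc : ([((pre.length : Nat) : Int)]).countP (fun x => decide ((l : Int) ≤ x)) = 1 := by
          simp [hlNi]
        rw [hNc]
        have ht := hchar l
        rw [List.countP_cons] at ht
        have hcple := List.countP_le_length (p := fun x => decide ((l : Int) ≤ x)) (l := rest)
        by_cases hle : (l : Int) ≤ e
        · have hcrest : rest.countP (fun x => decide ((l : Int) ≤ x)) = rest.length := by
            apply List.countP_eq_length.mpr
            intro x hx
            simp only [decide_eq_true_eq]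
            exact le_trans hle (le_of_lt (hrest_lt x hx))
          rw [if_pos (by simp [hle])] at ht
          omega
        · rw [if_neg (by simp [hle])] at ht
          have hcl := hcountdrop l
          omega
      · rw [hdropgt l (by omega)]
        simp only [List.count_nil]
        have hz : (rest ++ [((pre.length : Nat) : Int)]).countP (fun x => decide ((l : Int) ≤ x)) = 0 := by
          apply List.countP_eq_zero.mpr
          intro x hx
          rcases List.mem_append.mp hx with hx | hx
          · have hb := (hbnd x (List.mem_cons_of_mem _ hx)).2
            simp only [decide_eq_true_eq]
            have : ((pre.length : Nat) : Int) < (l : Int) := by exact_mod_cast (by omega : pre.length < l)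
            omega
          · rw [List.mem_singleton] at hx
            subst hx
            simp only [decide_eq_true_eq]
            have : ((pre.length : Nat) : Int) < (l : Int) := by exact_mod_cast (by omega : pre.length < l)
            omega
        rw [hz]
        omega
  · have hclt : pre.count p < kw.count p ∧ dq.length = pre.count p := by
      constructor <;> omega
    rw [if_neg hfull]
    refine ⟨?_, ?_, ?_, ?_⟩
    · rw [hcntp]
      simp only [List.length_append, List.length_singleton]
      omega
    · rw [List.pairwise_append]
      refine ⟨hsort, List.pairwise_singleton _ _, ?_⟩
      intro x hx y hy
      rw [List.mem_singleton] at hy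
      subst hy
      exact (hbnd x hx).2
    · intro x hx
      rcases List.mem_append.mp hx with hx | hx
      · have hb := hbnd x hx
        refine ⟨hb.1, ?_⟩
        simp only [List.length_append, List.length_singleton]
        push_cast
        omega
      · rw [List.mem_singleton] at hx
        subst hx
        refine ⟨Int.natCast_nonneg _, ?_⟩
        simp only [List.length_append, List.length_singleton]
        push_cast
        omega
    · intro l
      by_cases hlN : l ≤ pre.length
      · rw [hdrople l hlN, List.count_append]
        have hone : (([p] : List String)).count p = 1 := by simp
        rw [hone, List.countP_append]
        have hlNi : (l : Int) ≤ (pre.length : Int) := by exact_mod_cast hlN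
        have hNc : ([((pre.length : Nat) : Int)]).countP (fun x => decide ((l : Int) ≤ x)) = 1 := by
          simp [hlNi]
        rw [hNc]
        have ht := hchar l
        have hcple := List.countP_le_length (p := fun x => decide ((l : Int) ≤ x)) (l := dq)
        have hcl := hcountdrop l
        omega
      · rw [hdropgt l (by omega)]
        simp only [List.count_nil]
        have hz : (dq ++ [((pre.length : Nat) : Int)]).countP (fun x => decide ((l : Int) ≤ x)) = 0 := by
          apply List.countP_eq_zero.mpr
          intro x hx
          rcases List.mem_append.mp hx with hx | hx
          · have hb := (hbnd x hx).2
            simp only [decide_eq_true_eq]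
            have : ((pre.length : Nat) : Int) < (l : Int) := by exact_mod_cast (by omega : pre.length < l)
            omega
          · rw [List.mem_singleton] at hx
            subst hx
            simp only [decide_eq_true_eq]
            have : ((pre.length : Nat) : Int) < (l : Int) := by exact_mod_cast (by omega : pre.length < l)
            omega
        rw [hz]
        omega

-- a full deque: drop-l window has all copies iff l ≤ the oldest stored position
lemma pvDq_full_le_iff (kw pre : List String) (k : String) (dq : List Int) (hk : k ∈ kw)
    (h : pvDq kw pre k dq) (hfull : dq.length = kw.count k) (l : Nat) :
    kw.count k ≤ (pre.drop l).count k ↔ (l : Int) ≤ dq.headD 0 := by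
  obtain ⟨hlen, hsort, hbnd, hchar⟩ := h
  have hneed1 : 1 ≤ kw.count k := List.count_pos_iff.mpr hk
  obtain ⟨e, rest, rfl⟩ : ∃ e rest, dq = e :: rest := by
    cases dq with
    | nil => simp only [List.length_nil] at hfull; omega
    | cons a t => exact ⟨a, t, rfl⟩
  simp only [List.headD_cons]
  have ht := hchar l
  rw [List.countP_cons] at ht
  simp only [List.length_cons] at hfull
  have hcple := List.countP_le_length (p := fun x => decide ((l : Int) ≤ x)) (l := rest)
  have hrest_lt : ∀ x ∈ rest, e < x := (List.pairwise_cons.mp hsort).1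
  constructor
  · intro hc
    by_contra hno
    rw [if_neg (by simp [hno])] at ht
    omega
  · intro hle
    have hcrest : rest.countP (fun x => decide ((l : Int) ≤ x)) = rest.length := by
      apply List.countP_eq_length.mpr
      intro x hx
      simp only [decide_eq_true_eq]
      exact le_trans hle (le_of_lt (hrest_lt x hx))
    rw [if_pos (by simp [hle])] at ht
    omega

-- stored = total iff the whole prefix covers the keywords
lemma pvStored_iff (kw pre : List String) (f : String → List Int)
    (hdq : ∀ k ∈ PySem.List.dedup kw, pvDq kw pre k (f k)) :
    ((PySem.List.dedup kw).map (fun k => ((f k).length : Int))).sum = (kw.length : Int) ↔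
      pvCovers kw pre := by
  have hle' : ∀ k ∈ PySem.List.dedup kw, ((f k).length : Int) ≤ ((fun k => (kw.count k : Int)) k) := by
    intro k hk
    have hlen := (hdq k hk).1
    simp only []
    have : (f k).length ≤ kw.count k := by omega
    exact_mod_cast this
  rw [← pvSum_need kw, pvSum_eq_iff _ _ _ hle']
  unfold pvCovers
  constructor
  · intro h k hk
    have hkd : k ∈ PySem.List.dedup kw := (PySem.List.mem_dedup _ _).mpr hk
    have heq := h k hkd
    have hlen := (hdq k hkd).1
    have heqn : (f k).length = kw.count k := by exact_mod_cast heq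
    omega
  · intro h k hk
    have hlen := (hdq k hk).1
    have hc := h k ((PySem.List.mem_dedup _ _).mp hk)
    have : (f k).length = kw.count k := by omega
    exact_mod_cast this

lemma pvFull_of_stored (kw pre : List String) (f : String → List Int)
    (hdq : ∀ k ∈ PySem.List.dedup kw, pvDq kw pre k (f k))
    (h : ((PySem.List.dedup kw).map (fun k => ((f k).length : Int))).sum = (kw.length : Int)) :
    ∀ k ∈ PySem.List.dedup kw, (f k).length = kw.count k := by
  intro k hk
  have hle' : ∀ j ∈ PySem.List.dedup kw, ((f j).length : Int) ≤ ((fun j => (kw.count j : Int)) j) := by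
    intro j hj
    have hlen := (hdq j hj).1
    simp only []
    have : (f j).length ≤ kw.count j := by omega
    exact_mod_cast this
  rw [← pvSum_need kw] at h
  have := (pvSum_eq_iff _ _ _ hle').mp h k hk
  exact_mod_cast this

-- when the prefix covers: a drop-l window covers iff l ≤ the minimum of the deque heads
lemma pvCovers_drop_iff_min (kw pre : List String) (f : String → List Int) (hkw : kw ≠ [])
    (hdq : ∀ k ∈ PySem.List.dedup kw, pvDq kw pre k (f k))
    (hfull : ∀ k ∈ PySem.List.dedup kw, (f k).length = kw.count k) (l : Nat) :
    pvCovers kw (pre.drop l) ↔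
      (l : Int) ≤ ((PySem.List.min? ((PySem.List.dedup kw).map (fun k => (f k).headD 0))
        (fun x => x)).getD 0) := by
  have hdne : PySem.List.dedup kw ≠ [] := by
    cases kw with
    | nil => exact absurd rfl hkw
    | cons a t =>
      intro hc
      have ha : a ∈ PySem.List.dedup (a :: t) := (PySem.List.mem_dedup _ _).mpr (List.mem_cons_self ..)
      rw [hc] at ha
      simp at ha
  have hsne : (PySem.List.dedup kw).map (fun k => (f k).headD 0) ≠ [] := by
    intro hc
    exact hdne (List.map_eq_nil_iff.mp hc)
  obtain ⟨m, hm⟩ : ∃ m, PySem.List.min? ((PySem.List.dedup kw).map (fun k => (f k).headD 0)) (fun x => x) = some m := by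
    cases hmin : PySem.List.min? ((PySem.List.dedup kw).map (fun k => (f k).headD 0)) (fun x => x) with
    | none => exact absurd ((PySem.List.min?_eq_none_iff _ _).mp hmin) hsne
    | some m => exact ⟨m, rfl⟩
  rw [hm]
  simp only [Option.getD_some]
  have hmmem := PySem.List.min?_mem hm
  have hmmin := PySem.List.min?_isMin hm
  unfold pvCovers
  constructor
  · intro hc
    rcases List.mem_map.mp hmmem with ⟨k, hk, hkm⟩
    rw [← hkm]
    exact (pvDq_full_le_iff kw pre k (f k) ((PySem.List.mem_dedup _ _).mp hk) (hdq k hk)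
      (hfull k hk) l).mp (hc k ((PySem.List.mem_dedup _ _).mp hk))
  · intro hle k hk
    have hkd : k ∈ PySem.List.dedup kw := (PySem.List.mem_dedup _ _).mpr hk
    have hy : (f k).headD 0 ∈ (PySem.List.dedup kw).map (fun j => (f j).headD 0) :=
      List.mem_map.mpr ⟨k, hkd, rfl⟩
    have hmy := hmmin _ hy
    exact (pvDq_full_le_iff kw pre k (f k) hk (hdq k hkd) (hfull k hkd) l).mpr
      (le_trans hle hmy)

-- ---- shrink loop ----

lemma pvShrinkA_of_rem_ne (paragraph keywords : List String) (right : Int) (fuel : Nat)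
    (st : PySem.Dict String Int × Int × Int × (Int × Int)) (h : st.2.1 ≠ 0) :
    pvShrinkA paragraph keywords right fuel st = st := by
  obtain ⟨cnt, rem, left, res⟩ := st
  cases fuel with
  | zero => rfl
  | succ n =>
    simp only at h
    simp only [pvShrinkA]
    rw [if_neg h]

lemma pvShrinkA_spec (paragraph kw : List String) (hkw : kw ≠ []) :
    ∀ (fuel : Nat) (pre : List String) (cnt : PySem.Dict String Int) (left right : Int)
      (res : Int × Int),
      pre <+: paragraph →
      0 ≤ left → left.toNat ≤ pre.length →
      (∀ k ∈ kw, cnt.getD k 0 = (kw.count k : Int) - ((pre.drop left.toNat).count k : Int)) →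
      pre.length + 1 - left.toNat ≤ fuel →
      pvCovers kw (pre.drop left.toNat) →
      ∃ (left' : Int) (cnt' : PySem.Dict String Int),
        left ≤ left' ∧ 1 ≤ left' ∧ left'.toNat ≤ pre.length ∧
        pvCovers kw (pre.drop (left'.toNat - 1)) ∧
        ¬ pvCovers kw (pre.drop left'.toNat) ∧
        (∀ k ∈ kw, cnt'.getD k 0 = (kw.count k : Int) - ((pre.drop left'.toNat).count k : Int)) ∧
        pvShrinkA paragraph kw right fuel (cnt, 0, left, res) =
          (cnt', pvRem kw (pre.drop left'.toNat), left', pvUpd right res (left' - 1)) := by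
  intro fuel
  induction fuel with
  | zero =>
    intro pre cnt left right res hpre hl0 hlen hcnt hfuel hcov
    omega
  | succ fuel ih =>
    intro pre cnt left right res hpre hl0 hlen hcnt hfuel hcov
    have hwne : pre.drop left.toNat ≠ [] := pvCovers_nonempty kw _ hkw hcov
    have hlt : left.toNat < pre.length := by
      by_contra hc
      exact hwne (List.drop_eq_nil_of_le (by omega))
    have hget : PySem.List.pyGet? paragraph left = some (pre[left.toNat]) := by
      rw [PySem.List.pyGet?_of_nonneg (h := hl0)]
      obtain ⟨t, rfl⟩ := hpre
      rw [List.getElem?_append_left hlt, List.getElem?_eq_getElem hlt]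
    set pl := pre[left.toNat] with hpl
    have hwin : pre.drop left.toNat = pl :: pre.drop (left.toNat + 1) := List.drop_eq_getElem_cons hlt
    have hto : (left + 1).toNat = left.toNat + 1 := by omega
    simp only [pvShrinkA, hget]
    rw [if_pos trivial]
    have hupd : (if res = ((-1:Int), (-1:Int)) ∨ right - left < res.2 - res.1 then (left, right) else res) = pvUpd right res left := rfl
    rw [hupd]
    have h0 : pvRem kw (pre.drop left.toNat) = 0 := (pvRem_eq_zero_iff kw _).mpr hcov
    by_cases hmem : pl ∈ kw
    · rw [if_pos (by simp [hmem] : kw.contains pl = true)]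
      have hcw : (pre.drop left.toNat).count pl = (pre.drop (left.toNat + 1)).count pl + 1 := by
        rw [hwin, List.count_cons_self]
      have hcne : ∀ k, k ≠ pl → (pre.drop left.toNat).count k = (pre.drop (left.toNat + 1)).count k := by
        intro k hk
        rw [hwin]
        simp [Ne.symm hk]
      set c := cnt.getD pl 0 + 1 with hcdef
      have hc : c = (kw.count pl : Int) - ((pre.drop (left.toNat + 1)).count pl : Int) := by
        rw [hcdef, hcnt pl hmem, hcw]; push_cast; ring
      have hcovpl := hcov pl hmem
      have hcle : c ≤ 1 := by
        rw [hc]; omega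
      have hcnt' : ∀ k ∈ kw, (cnt.insert pl c).getD k 0 = (kw.count k : Int) - ((pre.drop (left.toNat + 1)).count k : Int) := by
        intro k hk
        by_cases hkp : k = pl
        · subst hkp; rw [PySem.Dict.getD_insert_self]; exact hc
        · rw [PySem.Dict.getD_insert_of_ne _ _ _ hkp, hcnt k hk, hcne k hkp]
      have hpl_dedup : pl ∈ PySem.List.dedup kw := (PySem.List.mem_dedup _ _).mpr hmem
      have hrem' : pvRem kw (pre.drop (left.toNat + 1)) = max 0 c := by
        unfold pvRem at h0 ⊢
        have hsum := pvSum_congr_except (PySem.List.dedup kw)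
          (fun k => max 0 ((kw.count k : Int) - ((pre.drop (left.toNat + 1)).count k : Int)))
          (fun k => max 0 ((kw.count k : Int) - ((pre.drop left.toNat).count k : Int)))
          pl (PySem.List.nodup_dedup kw)
          (by intro x hx hxp; simp only []; rw [hcne x hxp])
        rw [if_pos hpl_dedup] at hsum
        rw [hsum, h0]
        simp only []
        have h1 : max 0 ((kw.count pl : Int) - ((pre.drop left.toNat).count pl : Int)) = 0 := by
          omega
        rw [h1, ← hc]
        ring
      by_cases hc0 : 0 < c
      · rw [if_pos hc0]
        refine ⟨left + 1, cnt.insert pl c, by omega, by omega, by omega, ?_, ?_, ?_, ?_⟩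
        · rw [hto]
          simpa using hcov
        · rw [hto]
          intro hcc
          have hz := (pvRem_eq_zero_iff kw _).mpr hcc
          rw [hrem'] at hz
          omega
        · rw [hto]
          exact hcnt'
        · have e1 : pvRem kw (pre.drop ((left + 1)).toNat) = (0:Int) + 1 := by
            rw [hto, hrem']; omega
          have e2 : left + 1 - 1 = left := by ring
          rw [pvShrinkA_of_rem_ne paragraph kw right fuel _ (by norm_num), e1, e2]
      · rw [if_neg hc0]
        have hrem0 : pvRem kw (pre.drop (left.toNat + 1)) = 0 := by rw [hrem']; omega
        have hcov' : pvCovers kw (pre.drop (left.toNat + 1)) := (pvRem_eq_zero_iff kw _).mp hrem0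
        obtain ⟨left', cnt', hle', h1', hlen', hcovm, hncov, hcnt'', heq⟩ :=
          ih pre (cnt.insert pl c) (left + 1) right (pvUpd right res left) hpre (by omega)
            (by omega) (by rw [hto]; exact hcnt') (by omega) (by rw [hto]; exact hcov')
        refine ⟨left', cnt', by omega, h1', hlen', hcovm, hncov, hcnt'', ?_⟩
        rw [heq, pvUpd_chain right left (left' - 1) res hl0 (by omega)]
    · rw [if_neg (by simp [hmem] : ¬ kw.contains pl = true)]
      have hcne : ∀ k, k ∈ kw → (pre.drop left.toNat).count k = (pre.drop (left.toNat + 1)).count k := by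
        intro k hk
        have hkp : k ≠ pl := fun hc => hmem (hc ▸ hk)
        rw [hwin]
        simp [Ne.symm hkp]
      have hcov' : pvCovers kw (pre.drop (left.toNat + 1)) := by
        intro k hk
        rw [← hcne k hk]
        exact hcov k hk
      obtain ⟨left', cnt', hle', h1', hlen', hcovm, hncov, hcnt'', heq⟩ :=
        ih pre cnt (left + 1) right (pvUpd right res left) hpre (by omega) (by omega)
          (by rw [hto]; intro k hk; rw [hcnt k hk, hcne k hk]) (by omega) (by rw [hto]; exact hcov')
      refine ⟨left', cnt', by omega, h1', hlen', hcovm, hncov, hcnt'', ?_⟩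
      rw [heq, pvUpd_chain right left (left' - 1) res hl0 (by omega)]
-- ---- the joint step and fold ----

lemma pvStep_spec (paragraph kw pre : List String) (p : String) (hkw : kw ≠ [])
    (hpre : (pre ++ [p]) <+: paragraph)
    (stA : PySem.Dict String Int × Int × Int × (Int × Int))
    (stB : PySem.Dict String (List Int) × Int × (Int × Int))
    (hJ : pvJ kw pre stA stB) :
    pvJ kw (pre ++ [p]) (pvStepA paragraph kw stA ((pre.length : Int), p))
      (pvStepB (PySem.Dict.counter kw) (PySem.List.len kw) stB ((pre.length : Int), p)) := by
  unfold pvJ at hJ ⊢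
  obtain ⟨cnt, rem, left, resA⟩ := stA
  obtain ⟨lp, stored, resB⟩ := stB
  simp only [] at hJ
  obtain ⟨hl0, hlen, hcnt, hrem, hrem1, hmax, hres, htie, f, hitems, hstored, hdq⟩ := hJ
  subst hres
  have hto : left.toNat ≤ pre.length := hlen
  have hlcast : (left.toNat : Int) = left := Int.toNat_of_nonneg hl0
  have hdropapp : ∀ l : Nat, l ≤ pre.length → (pre ++ [p]).drop l = pre.drop l ++ [p] := by
    intro l hl
    rw [List.drop_append]
    have h0 : l - pre.length = 0 := by omega
    rw [h0, List.drop_zero]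
  have hlenapp : (pre ++ [p]).length = pre.length + 1 := by simp
  by_cases hp : p ∈ kw
  · -- p is a keyword
    have hcontA : kw.contains p = true := by simp [hp]
    have hcontB : (PySem.Dict.counter kw).contains p = true := by
      rw [PySem.Dict.contains_counter]; exact hcontA
    have hpd : p ∈ PySem.List.dedup kw := (PySem.List.mem_dedup _ _).mpr hp
    have hkeys : lp.keys = PySem.List.dedup kw := by
      show lp.items.map (·.1) = _
      rw [hitems, List.map_map]
      simp [Function.comp_def]
    have hknodup : lp.keys.Nodup := by rw [hkeys]; exact PySem.List.nodup_dedup kw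
    have hmemit : (p, f p) ∈ lp.items := by
      rw [hitems]
      exact List.mem_map.mpr ⟨p, hpd, rfl⟩
    have hgetdq : lp.getD p [] = f p :=
      PySem.Dict.getD_of_mem_items lp hmemit hknodup []
    have hlpcont : lp.contains p = true := by
      rw [PySem.Dict.contains_iff_mem_keys lp p, hkeys]
      exact hpd
    have hwinp : ∀ l : Nat, l ≤ pre.length → ((pre ++ [p]).drop l).count p = (pre.drop l).count p + 1 := by
      intro l hl
      rw [hdropapp l hl, List.count_append]
      simp
    have hwne : ∀ (k : String), k ≠ p → ∀ l : Nat, l ≤ pre.length →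
        ((pre ++ [p]).drop l).count k = (pre.drop l).count k := by
      intro k hk l hl
      rw [hdropapp l hl, List.count_append]
      simp [Ne.symm hk]
    unfold pvStepA pvStepB
    simp only [hcontA, hcontB, if_true, hgetdq, PySem.Dict.getD_counter, PySem.List.len_eq,
      Nat.cast_inj]
    simp only [apply_ite (Prod.fst (α := List Int) (β := Int)),
      apply_ite (Prod.snd (α := List Int) (β := Int))]
    set dqn := (if (f p).length = kw.count p then (f p).drop 1 else f p) ++ [(pre.length : Int)] with hdqn
    set sn : Int := if (f p).length = kw.count p then stored else stored + 1 with hsn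
    set c0 := cnt.getD p 0 - 1 with hc0def
    set f' : String → List Int := fun k => if k = p then dqn else f k with hf'def
    have hc0 : c0 = (kw.count p : Int) - (((pre ++ [p]).drop left.toNat).count p : Int) := by
      rw [hc0def, hcnt p hp, hwinp left.toNat hto]
      push_cast
      ring
    have hcnt' : ∀ k ∈ kw, (cnt.insert p c0).getD k 0 =
        (kw.count k : Int) - (((pre ++ [p]).drop left.toNat).count k : Int) := by
      intro k hk
      by_cases hkp : k = p
      · subst hkp
        rw [PySem.Dict.getD_insert_self]
        exact hc0
      · rw [PySem.Dict.getD_insert_of_ne _ _ _ hkp, hcnt k hk, hwne k hkp left.toNat hto]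
    have hremA : (if 0 ≤ c0 then rem - 1 else rem) = pvRem kw ((pre ++ [p]).drop left.toNat) := by
      have hsum := pvSum_congr_except (PySem.List.dedup kw)
        (fun k => max 0 ((kw.count k : Int) - (((pre ++ [p]).drop left.toNat).count k : Int)))
        (fun k => max 0 ((kw.count k : Int) - ((pre.drop left.toNat).count k : Int)))
        p (PySem.List.nodup_dedup kw)
        (by intro x hx hxp; simp only []; rw [hwne x hxp left.toNat hto])
      rw [if_pos hpd] at hsum
      unfold pvRem
      rw [hsum]
      simp only []
      unfold pvRem at hrem
      rw [← hrem]
      have h1 : (kw.count p : Int) - ((pre.drop left.toNat).count p : Int) = c0 + 1 := by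
        rw [hc0, hwinp left.toNat hto]
        push_cast
        ring
      rw [h1, ← hc0]
      split_ifs with h2 <;> omega
    have hitems' : (lp.insert p dqn).items = (PySem.List.dedup kw).map (fun k => (k, f' k)) := by
      rw [PySem.Dict.items_insert_of_contains lp dqn hlpcont, hitems, List.map_map]
      apply List.map_congr_left
      intro k hk
      by_cases hkp : k = p
      · subst hkp
        simp [hf'def]
      · simp [hf'def, hkp]
    have hvals : (lp.insert p dqn).values.map (fun d => d.headD 0) =
        (PySem.List.dedup kw).map (fun k => (f' k).headD 0) := by
      show ((lp.insert p dqn).items.map (·.2)).map _ = _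
      rw [hitems', List.map_map, List.map_map]
      rfl
    have hdq' : ∀ k ∈ PySem.List.dedup kw, pvDq kw (pre ++ [p]) k (f' k) := by
      intro k hk
      by_cases hkp : k = p
      · subst hkp
        have : f' k = dqn := by simp [hf'def]
        rw [this, hdqn]
        exact pvDq_append_self kw pre k (f k) hp (hdq k hpd)
      · have : f' k = f k := by simp [hf'def, hkp]
        rw [this]
        exact pvDq_append_ne kw pre k p (f k) hkp (hdq k hk)
    have hneed1 : 1 ≤ kw.count p := List.count_pos_iff.mpr hp
    have hsum' : sn = ((PySem.List.dedup kw).map (fun k => ((f' k).length : Int))).sum := by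
      have hsum := pvSum_congr_except (PySem.List.dedup kw)
        (fun k => ((f' k).length : Int)) (fun k => ((f k).length : Int)) p
        (PySem.List.nodup_dedup kw) (by intro x hx hxp; simp [hf'def, hxp])
      rw [if_pos hpd] at hsum
      rw [hsum, ← hstored]
      simp only []
      have hfp : f' p = dqn := by simp [hf'def]
      rw [hfp, hdqn, hsn]
      by_cases hfull : (f p).length = kw.count p
      · rw [if_pos hfull, if_pos hfull]
        simp only [List.length_append, List.length_drop, List.length_singleton]
        have : (f p).length - 1 + 1 = (f p).length := by omega
        rw [this]
        omega
      · rw [if_neg hfull, if_neg hfull]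
        simp only [List.length_append, List.length_singleton]
        push_cast
        ring
    have hstored_iff := pvStored_iff kw (pre ++ [p]) f' hdq'
    by_cases hcomp : pvRem kw ((pre ++ [p]).drop left.toNat) = 0
    · -- the hit completes coverage of the window: A shrinks, B records the same window
      have hcov' : pvCovers kw ((pre ++ [p]).drop left.toNat) := (pvRem_eq_zero_iff kw _).mp hcomp
      have hcovpre' : pvCovers kw (pre ++ [p]) :=
        pvCovers_of_sublist kw _ _ (List.drop_sublist _ _) hcov'
      have hsn_total : sn = (kw.length : Int) := by
        rw [hsum']
        exact hstored_iff.mpr hcovpre'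
      have hfull' := pvFull_of_stored kw (pre ++ [p]) f' hdq' (by rw [← hsum']; exact hsn_total)
      obtain ⟨left'', cnt'', hge, h1'', hlen'', hcovm'', hncov'', hcnt'', heq''⟩ :=
        pvShrinkA_spec paragraph kw hkw (paragraph.length + 1) (pre ++ [p]) (cnt.insert p c0)
          left (pre.length : Int) resB hpre hl0 (by rw [hlenapp]; omega) hcnt'
          (by have := hpre.length_le; rw [hlenapp]; omega) hcov'
      rw [hremA, hcomp, heq'', if_pos hsn_total, hvals]
      set M := (PySem.List.min? ((PySem.List.dedup kw).map fun k => (f' k).headD 0)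
        (fun x => x)).getD 0 with hM
      have hiff := pvCovers_drop_iff_min kw (pre ++ [p]) f' hkw hdq' hfull'
      have hM1 : ((left''.toNat - 1 : Nat) : Int) ≤ M := (hiff (left''.toNat - 1)).mp hcovm''
      have hM2 : ¬ ((left''.toNat : Int) ≤ M) := fun hc => hncov'' ((hiff left''.toNat).mpr hc)
      have hl''cast : (left''.toNat : Int) = left'' := Int.toNat_of_nonneg (by omega)
      have hMeq : M = left'' - 1 := by omega
      rw [hMeq]
      have hBupd : (if resB = ((-1 : Int), (-1 : Int)) ∨
          (pre.length : Int) - (left'' - 1) < resB.2 - resB.1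
          then ((left'' - 1, (pre.length : Int)) : Int × Int) else resB)
          = pvUpd (pre.length : Int) resB (left'' - 1) := rfl
      rw [hBupd]
      dsimp only
      refine ⟨by omega, hlen'', hcnt'', rfl, ?_, Or.inr hcovm'', rfl, ?_, f', hitems', hsum', hdq'⟩
      · have hnz : pvRem kw ((pre ++ [p]).drop left''.toNat) ≠ 0 :=
          fun hz => hncov'' ((pvRem_eq_zero_iff _ _).mp hz)
        have := pvRem_nonneg kw ((pre ++ [p]).drop left''.toNat)
        omega
      · intro _
        refine ⟨pvUpd_ne _ _ _ (by omega), ?_⟩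
        have := pvUpd_len_le (pre.length : Int) (left'' - 1) resB
        rw [hlenapp]
        push_cast
        omega
    · -- no completion: A's shrink loop does not run; any B candidate is too long to update
      have hnz : (if 0 ≤ c0 then rem - 1 else rem) ≠ 0 := by rw [hremA]; exact hcomp
      rw [pvShrinkA_of_rem_ne paragraph kw (pre.length : Int) (paragraph.length + 1) _ hnz, hremA]
      have hncov' : ¬ pvCovers kw ((pre ++ [p]).drop left.toNat) :=
        fun hc => hcomp ((pvRem_eq_zero_iff _ _).mpr hc)
      have hrem5 : 1 ≤ pvRem kw ((pre ++ [p]).drop left.toNat) := by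
        have := pvRem_nonneg kw ((pre ++ [p]).drop left.toNat)
        omega
      by_cases hBfire : sn = (kw.length : Int)
      · have hcovpre' : pvCovers kw (pre ++ [p]) := hstored_iff.mp (by rw [← hsum']; exact hBfire)
        have hfull' := pvFull_of_stored kw (pre ++ [p]) f' hdq' (by rw [← hsum']; exact hBfire)
        rw [if_pos hBfire, hvals]
        set M := (PySem.List.min? ((PySem.List.dedup kw).map fun k => (f' k).headD 0)
          (fun x => x)).getD 0 with hM
        have hiff := pvCovers_drop_iff_min kw (pre ++ [p]) f' hkw hdq' hfull'
        have hMlt : ¬ ((left.toNat : Int) ≤ M) := fun hc => hncov' ((hiff left.toNat).mpr hc)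
        have hleft0 : left ≠ 0 := by
          intro hz
          apply hncov'
          rw [hz]
          simpa using hcovpre'
        have hcovpre : pvCovers kw pre := by
          rcases hmax with hz | hcm
          · exact absurd hz hleft0
          · exact pvCovers_drop_mono kw pre 0 (left.toNat - 1) (Nat.zero_le _) hcm
        obtain ⟨hrne, hrlen⟩ := htie hcovpre
        have hnoupd : pvUpd (pre.length : Int) resB M = resB := by
          apply pvUpd_noupdate _ _ _ hrne
          omega
        have hBupd : (if resB = ((-1 : Int), (-1 : Int)) ∨
            (pre.length : Int) - M < resB.2 - resB.1
            then ((M, (pre.length : Int)) : Int × Int) else resB)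
            = pvUpd (pre.length : Int) resB M := rfl
        rw [hBupd, hnoupd]
        dsimp only
        refine ⟨hl0, by rw [hlenapp]; omega, hcnt', rfl, hrem5, ?_, rfl, ?_, f', hitems', hsum', hdq'⟩
        · rcases hmax with hz | hcm
          · exact absurd hz hleft0
          · exact Or.inr (pvCovers_of_sublist kw _ _
              (by rw [hdropapp _ (by omega)]; exact List.sublist_append_left _ _) hcm)
        · intro _
          refine ⟨hrne, ?_⟩
          rw [hlenapp]
          push_cast
          omega
      · rw [if_neg hBfire]
        have hncp' : ¬ pvCovers kw (pre ++ [p]) :=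
          fun hc => hBfire (by rw [hsum']; exact hstored_iff.mpr hc)
        dsimp only
        refine ⟨hl0, by rw [hlenapp]; omega, hcnt', rfl, hrem5, ?_, rfl, ?_, f', hitems', hsum', hdq'⟩
        · rcases hmax with hz | hcm
          · exact Or.inl hz
          · exact Or.inr (pvCovers_of_sublist kw _ _
              (by rw [hdropapp _ (by omega)]; exact List.sublist_append_left _ _) hcm)
        · intro hc
          exact absurd hc hncp'
  · -- p is not a keyword: both steps leave everything but the prefix unchanged
    have hcontA : kw.contains p = false := by simp [hp]
    have hcontB : (PySem.Dict.counter kw).contains p = false := by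
      rw [PySem.Dict.contains_counter]; exact hcontA
    unfold pvStepA pvStepB
    simp only [hcontA, hcontB, Bool.false_eq_true, if_false]
    rw [pvShrinkA_of_rem_ne paragraph kw (pre.length : Int) (paragraph.length + 1) _
      (by show rem ≠ 0; omega)]
    have hcount : ∀ (k : String), k ∈ kw → ∀ l : Nat, l ≤ pre.length →
        ((pre ++ [p]).drop l).count k = (pre.drop l).count k := by
      intro k hk l hl
      rw [hdropapp l hl, List.count_append]
      have hkp : k ≠ p := fun hc => hp (hc ▸ hk)
      simp [Ne.symm hkp]
    dsimp only
    refine ⟨hl0, by rw [hlenapp]; omega, ?_, ?_, hrem1, ?_, rfl, ?_, f, hitems, hstored, ?_⟩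
    · intro k hk
      rw [hcount k hk left.toNat hto]
      exact hcnt k hk
    · rw [hrem]
      unfold pvRem
      apply congrArg
      apply List.map_congr_left
      intro k hk
      rw [hcount k ((PySem.List.mem_dedup _ _).mp hk) left.toNat hto]
    · rcases hmax with hz | hcm
      · exact Or.inl hz
      · exact Or.inr (pvCovers_of_sublist kw _ _
          (by rw [hdropapp _ (by omega)]; exact List.sublist_append_left _ _) hcm)
    · intro hc'
      have hcpre : pvCovers kw pre := by
        intro k hk
        have h0 := hcount k hk 0 (Nat.zero_le _)
        simp only [List.drop_zero] at h0
        rw [← h0]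
        exact hc' k hk
      obtain ⟨hne, hlt⟩ := htie hcpre
      refine ⟨hne, ?_⟩
      rw [hlenapp]
      push_cast
      omega
    · intro k hk
      exact pvDq_append_ne kw pre k p (f k)
        (fun hc => hp (hc ▸ (PySem.List.mem_dedup _ _).mp hk)) (hdq k hk)

lemma pvFold_spec (paragraph kw : List String) (hkw : kw ≠ []) :
    ∀ (rest pre : List String), pre ++ rest = paragraph →
      ∀ stA stB, pvJ kw pre stA stB →
      pvJ kw paragraph
        ((PySem.List.enumerate rest (pre.length : Int)).foldl (pvStepA paragraph kw) stA)
        ((PySem.List.enumerate rest (pre.length : Int)).foldl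
          (pvStepB (PySem.Dict.counter kw) (PySem.List.len kw)) stB) := by
  intro rest
  induction rest with
  | nil =>
    intro pre hpre stA stB hJ
    rw [List.append_nil] at hpre
    subst hpre
    simpa [PySem.List.enumerate_nil] using hJ
  | cons x t ih =>
    intro pre hpre stA stB hJ
    rw [PySem.List.enumerate_cons]
    simp only [List.foldl_cons]
    have hpre' : (pre ++ [x]) ++ t = paragraph := by
      rw [List.append_assoc]
      simpa using hpre
    have hstep := pvStep_spec paragraph kw pre x hkw ⟨t, hpre'⟩ stA stB hJ
    have hlen : (pre.length : Int) + 1 = (((pre ++ [x]).length : Nat) : Int) := by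
      simp [List.length_append]
    rw [hlen]
    exact ih (pre ++ [x]) hpre' _ _ hstep

lemma pvJ_init (kw : List String) (hkw : kw ≠ []) :
    pvJ kw [] (PySem.Dict.counter kw, PySem.List.len kw, 0, (-1, -1))
      ((PySem.Dict.counter kw).keys.foldl (fun d k => d.insert k ([] : List Int)) PySem.Dict.empty,
        (0 : Int), ((-1 : Int), (-1 : Int))) := by
  unfold pvJ
  have hd : PySem.List.dedup kw = PySem.Set.ofList kw := PySem.List.dedup_eq_ofList kw
  have hlen1 : 1 ≤ kw.length := by
    cases kw with
    | nil => exact absurd rfl hkw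
    | cons a t => simp
  refine ⟨le_refl 0, by simp, ?_, ?_, ?_, Or.inl rfl, rfl, ?_, ?_⟩
  · intro k hk
    rw [PySem.Dict.getD_counter]
    simp
  · show PySem.List.len kw = pvRem kw _
    have hr : pvRem kw ([] : List String) = (kw.length : Int) := by
      unfold pvRem
      rw [← pvSum_need kw]
      apply congrArg
      apply List.map_congr_left
      intro k hk
      simp only [List.count_nil]
      omega
    have h2 : (List.drop (0 : Int).toNat ([] : List String)) = [] := rfl
    rw [h2, hr, PySem.List.len_eq]
  · show (1 : Int) ≤ PySem.List.len kw
    rw [PySem.List.len_eq]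
    exact_mod_cast hlen1
  · intro hc
    exact absurd rfl (pvCovers_nonempty kw [] hkw hc)
  · refine ⟨fun _ => ([] : List Int), ?_, ?_, ?_⟩
    · simp only []
      rw [PySem.Dict.keys_counter, ← hd]
      have hfresh := PySem.Dict.items_foldl_insert_fresh (PySem.List.dedup kw) (fun a => a)
        (fun _ => ([] : List Int)) PySem.Dict.empty
        (fun a _ => PySem.Dict.contains_empty a)
        (by simpa using PySem.List.nodup_dedup kw)
      simpa using hfresh
    · simp
    · intro k hk
      exact pvDq_nil kw k

-- ===== VERDICT (by name: the statement is the Claim_ definition above) =====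
theorem find_smallest_subarray_covering_set_spec : Claim_equal_find_smallest_subarray_covering_set := by
  intro paragraph keywords _ hpre
  unfold Spec_find_smallest_subarray_covering_set
  by_cases hkw : keywords = []
  · rcases hpre with h | h
    · exact absurd hkw h
    · subst h hkw; rfl
  · have h := pvFold_spec paragraph keywords hkw paragraph [] rfl _ _ (pvJ_init keywords hkw)
    unfold find_smallest_subarray_covering_set find_smallest_subarray_covering_set_alt
    simp only []
    exact (h.2.2.2.2.2.2.1).symm
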